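-- pv_equiv track=rewrite | github.com/ErranderLee/ProblemSolving | 백준/BOJ21608.py | filter_second_cond
-- ===== SOURCE A (Python) =====
-- import collections
--
-- def filter_second_cond(maps, upper_result):
--     dx = [-1, 1, 0, 0]
--     dy = [0, 0, -1, 1]
--     n = len(maps)
--     count_dict = collections.defaultdict(list)
--     for node in upper_result:
--         count = 0
--         for i in range(4):
--             x = node[0] + dx[i]
--             y = node[1] + dy[i]
--             if 0 <= x < n and 0 <= y < n and maps[x][y] == 0:
--                 count += 1
--         count_dict[count].append((node[0], node[1]))
--     return count_dict[max(count_dict.keys())]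
-- ===== SOURCE B (Python) =====
-- def filter_second_cond(maps, upper_result):
--     n = len(maps)
--     counts = {(r, c): 0 for r, c in upper_result}
--     for i, row in enumerate(maps):
--         for j, v in enumerate(row[:n]):
--             if v == 0:
--                 for nb in ((i - 1, j), (i + 1, j), (i, j - 1), (i, j + 1)):
--                     if nb in counts:
--                         counts[nb] += 1
--     best = max(counts.values())
--     return [(r, c) for r, c in upper_result if counts[(r, c)] == best]
-- ===== Notes on version B (the rewrite author's own statement) =====
-- stated objective: alternative
-- what changed: Replaces A's per-candidate gather (probe the four neighbours of each node and group nodes in a defaultdict keyed by count) with an inverted scatter pass: a dict of candidate counts initialised to zero, one scan over the board that adds 1 to every candidate adjacent to each empty cell, then max over the counts and an order-preserving filter of upper_result.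
import Mathlib
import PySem

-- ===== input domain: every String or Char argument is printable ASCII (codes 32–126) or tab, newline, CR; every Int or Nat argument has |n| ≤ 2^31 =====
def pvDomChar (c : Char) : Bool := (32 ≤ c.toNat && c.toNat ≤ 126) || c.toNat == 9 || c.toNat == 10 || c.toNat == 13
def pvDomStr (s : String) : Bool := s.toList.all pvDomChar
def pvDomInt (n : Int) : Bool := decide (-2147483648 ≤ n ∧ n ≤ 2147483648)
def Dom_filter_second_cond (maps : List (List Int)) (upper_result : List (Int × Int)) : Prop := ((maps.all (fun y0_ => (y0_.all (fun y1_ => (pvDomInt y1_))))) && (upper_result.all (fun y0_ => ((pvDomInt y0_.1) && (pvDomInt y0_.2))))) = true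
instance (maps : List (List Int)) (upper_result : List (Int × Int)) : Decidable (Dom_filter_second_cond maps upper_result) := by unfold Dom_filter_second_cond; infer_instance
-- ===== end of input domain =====

-- B inverts the traversal: instead of probing the four neighbours of each candidate, it scans
-- the board once and scatters +1 from every empty cell to its adjacent candidates
-- (objective: alternative algorithm, same cost; return value only).

-- (objective: alternative algorithm, same cost; return value only).

-- ===== PORT A =====
-- inner 'for i in range(4)' loop of A: count the empty in-bounds neighbours
def pvCountA (maps : List (List Int)) (node : Int × Int) : Int :=
  let dx : List Int := [-1, 1, 0, 0]
  let dy : List Int := [0, 0, -1, 1]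
  let n : Int := (maps.length : Int)
  (PySem.List.pyRange 0 4 1).foldl (fun count i =>
    let x := node.1 + PySem.List.pyGetD dx i 0
    let y := node.2 + PySem.List.pyGetD dy i 0
    -- maps[x][y] == 0 : under Pre_ the guarded access is in range, so pyGetD is exact
    if 0 ≤ x ∧ x < n ∧ 0 ≤ y ∧ y < n ∧ PySem.List.pyGetD (PySem.List.pyGetD maps x []) y 1 = 0
    then count + 1 else count) 0

-- the 'for node in upper_result' loop building count_dict
def pvDictA (maps : List (List Int)) (upper_result : List (Int × Int)) : PySem.Dict Int (List (Int × Int)) :=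
  upper_result.foldl (fun d node =>
    d.modify (pvCountA maps node) [] (· ++ [(node.1, node.2)])) PySem.Dict.empty

def filter_second_cond (maps : List (List Int)) (upper_result : List (Int × Int)) : List (Int × Int) :=
  match PySem.List.max? (pvDictA maps upper_result).keys (fun k => k) with
  | some m => (pvDictA maps upper_result).getD m []
  | none => []   -- Python raises ValueError here (empty upper_result); excluded by Pre_

-- ===== PORT B =====
-- the tuple of four neighbour positions of a cell
def pvNbrs (i j : Int) : List (Int × Int) :=
  [(i - 1, j), (i + 1, j), (i, j - 1), (i, j + 1)]

-- 'if nb in counts: counts[nb] += 1'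
def pvBump (d : PySem.Dict (Int × Int) Int) (nb : Int × Int) : PySem.Dict (Int × Int) Int :=
  if d.contains nb then d.modify nb 0 (· + 1) else d

-- '{(r, c): 0 for r, c in upper_result}'
def pvCounts0 (upper_result : List (Int × Int)) : PySem.Dict (Int × Int) Int :=
  upper_result.foldl (fun d p => d.insert (p.1, p.2) 0) PySem.Dict.empty

-- the board scan 'for i, row in enumerate(maps): for j, v in enumerate(row[:n]): ...'
def pvScanB (maps : List (List Int)) (d : PySem.Dict (Int × Int) Int) : PySem.Dict (Int × Int) Int :=
  (PySem.List.enumerate maps 0).foldl (fun d ir =>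
    (PySem.List.enumerate (PySem.List.slice ir.2 none (some (maps.length : Int))) 0).foldl (fun d jv =>
      if jv.2 = 0 then (pvNbrs ir.1 jv.1).foldl pvBump d else d) d) d

def filter_second_cond_alt (maps : List (List Int)) (upper_result : List (Int × Int)) : List (Int × Int) :=
  match PySem.List.max? (pvScanB maps (pvCounts0 upper_result)).values (fun v => v) with
  | some best => upper_result.filter
      (fun p => (pvScanB maps (pvCounts0 upper_result)).getD (p.1, p.2) 0 == best)
  | none => []   -- Python raises ValueError here (empty upper_result); excluded by Pre_

-- ===== PRECONDITION & SPEC =====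
-- A raises ValueError on empty upper_result (max of no keys) and IndexError when a guarded
-- neighbour access maps[x][y] hits a row shorter than len(maps); Pre_ excludes exactly those.
def Pre_filter_second_cond (maps : List (List Int)) (upper_result : List (Int × Int)) : Prop :=
  upper_result ≠ [] ∧
  ∀ node ∈ upper_result, ∀ d ∈ ([(-1, 0), (1, 0), (0, -1), (0, 1)] : List (Int × Int)),
    (0 ≤ node.1 + d.1 ∧ node.1 + d.1 < (maps.length : Int) ∧
     0 ≤ node.2 + d.2 ∧ node.2 + d.2 < (maps.length : Int)) →
    node.2 + d.2 < ((PySem.List.pyGetD maps (node.1 + d.1) []).length : Int)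
instance (maps : List (List Int)) (upper_result : List (Int × Int)) : Decidable (Pre_filter_second_cond maps upper_result) := by unfold Pre_filter_second_cond; infer_instance

def pvWitness_filter_second_cond : List (List Int) × (List (Int × Int)) :=
  ([[0, 1], [1, 0]], [(0, 0), (1, 1)])

def Spec_filter_second_cond (maps : List (List Int)) (upper_result : List (Int × Int)) (out : List (Int × Int)) : Prop := out = filter_second_cond_alt maps upper_result
instance (maps : List (List Int)) (upper_result : List (Int × Int)) (out : List (Int × Int)) : Decidable (Spec_filter_second_cond maps upper_result out) := by unfold Spec_filter_second_cond; infer_instance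

-- ===== CLAIM (what is proved, stated in full; the proofs are below) =====
def Claim_equal_filter_second_cond : Prop := ∀ (maps : List (List Int)) (upper_result : List (Int × Int)), Dom_filter_second_cond maps upper_result → Pre_filter_second_cond maps upper_result → Spec_filter_second_cond maps upper_result (filter_second_cond maps upper_result)

-- ===== LEMMAS AND PROOFS =====


-- keys/contains invariants of the bump loop
theorem pvBump_keys (d : PySem.Dict (Int × Int) Int) (nb : Int × Int) :
    (pvBump d nb).keys = d.keys := by
  unfold pvBump
  split
  · rename_i h
    rw [PySem.Dict.keys_modify, PySem.Dict.keys_insert_of_contains (h := h)]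
  · rfl

theorem foldl_bump_keys (E : List (Int × Int)) (d : PySem.Dict (Int × Int) Int) :
    (E.foldl pvBump d).keys = d.keys := by
  induction E generalizing d with
  | nil => rfl
  | cons e E ih => rw [List.foldl_cons, ih, pvBump_keys]

theorem pvBump_contains (d : PySem.Dict (Int × Int) Int) (nb p : Int × Int) :
    (pvBump d nb).contains p = d.contains p := by
  rw [PySem.Dict.contains_eq_decide_mem_keys, PySem.Dict.contains_eq_decide_mem_keys, pvBump_keys]

theorem foldl_bump_getD (E : List (Int × Int)) (d : PySem.Dict (Int × Int) Int)
    (p : Int × Int) (hp : d.contains p = true) :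
    (E.foldl pvBump d).getD p 0 = d.getD p 0 + (E.count p : Int) := by
  induction E generalizing d with
  | nil => simp
  | cons e E ih =>
    rw [List.foldl_cons, ih _ (by rw [pvBump_contains]; exact hp)]
    have hstep : (pvBump d e).getD p 0 = d.getD p 0 + (if p = e then 1 else 0) := by
      unfold pvBump
      split
      · rw [PySem.Dict.getD_modify]
        split <;> simp [*]
      · rename_i h
        have : p ≠ e := fun he => by rw [he] at hp; rw [hp] at h; exact h rfl
        simp [this]
    rw [hstep, List.count_cons]
    by_cases hpe : p = e
    · simp [hpe]
      ring
    · have hb : (e == p) = false := by rw [beq_eq_false_iff_ne]; exact Ne.symm hpe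
      simp [hpe, hb]

-- the initial dict: every lookup with default 0 gives 0, keys are the distinct nodes
theorem counts0_getD (l : List (Int × Int)) (d : PySem.Dict (Int × Int) Int) (q : Int × Int)
    (h : d.getD q 0 = 0) :
    (l.foldl (fun d p => d.insert (p.1, p.2) 0) d).getD q 0 = 0 := by
  induction l generalizing d with
  | nil => exact h
  | cons p l ih =>
    rw [List.foldl_cons]
    refine ih _ ?_
    rw [PySem.Dict.getD_insert]
    split <;> simp [h]

theorem counts0_keys (l : List (Int × Int)) :
    (pvCounts0 l).keys = PySem.Set.ofList l := by
  unfold pvCounts0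
  rw [PySem.Dict.keys_foldl_insert_key l (fun p => (p.1, p.2)) (fun _ _ => 0)]
  simp [PySem.Set.update_nil_left]

-- the flat list of increment events of B's board scan
def pvEvents (maps : List (List Int)) : List (Int × Int) :=
  (PySem.List.enumerate maps 0).flatMap (fun ir =>
    (PySem.List.enumerate (PySem.List.slice ir.2 none (some (maps.length : Int))) 0).flatMap
      (fun jv => if jv.2 = 0 then pvNbrs ir.1 jv.1 else []))

-- B's nested board loops are the fold of pvBump over the flat event list
theorem scan_eq_foldl_events (maps : List (List Int)) (d : PySem.Dict (Int × Int) Int) :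
    pvScanB maps d = (pvEvents maps).foldl pvBump d := by
  unfold pvScanB pvEvents
  rw [List.foldl_flatMap]
  apply PySem.List.foldl_congr_mem
  intro d ir _
  rw [List.foldl_flatMap]
  apply PySem.List.foldl_congr_mem
  intro d jv _
  split <;> simp

-- count distributes over flatMap
theorem count_flatMap {α β : Type} [BEq β] (l : List α) (g : α → List β) (b : β) :
    ((l.flatMap g).count b) = (l.map (fun x => (g x).count b)).sum := by
  induction l with
  | nil => simp
  | cons x l ih => simp [List.flatMap_cons, List.count_append, ih]

-- a sum of pointwise sums splits
theorem sum_map_add {α : Type} (l : List α) (f g : α → Nat) :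
    (l.map (fun x => f x + g x)).sum = (l.map f).sum + (l.map g).sum := by
  induction l with
  | nil => simp
  | cons x l ih => simp [ih]; omega

-- occurrences of p among the four neighbours of a cell, as four indicators
theorem count_nbrs (i j : Int) (p : Int × Int) :
    (pvNbrs i j).count p
      = ((if p = (i - 1, j) then 1 else 0) + (if p = (i + 1, j) then 1 else 0))
        + ((if p = (i, j - 1) then 1 else 0) + (if p = (i, j + 1) then 1 else 0)) := by
  unfold pvNbrs
  simp only [List.count_cons, List.count_nil, beq_iff_eq, Prod.ext_iff]
  split_ifs <;> omega

-- a sum over an enumeration in which only index t can contribute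
theorem sum_enum {α : Type} (l : List α) (s t : Int) (h : α → Nat) (dflt : α) :
    ((PySem.List.enumerate l s).map (fun ix => if ix.1 = t then h ix.2 else 0)).sum
      = if 0 ≤ t - s ∧ (t - s).toNat < l.length then h (l.getD (t - s).toNat dflt) else 0 := by
  induction l generalizing s with
  | nil => simp
  | cons x l ih =>
    rw [PySem.List.enumerate_cons, List.map_cons, List.sum_cons, ih (s + 1)]
    by_cases hst : s = t
    · have h0 : (t - s).toNat = 0 := by omega
      have h2 : 0 ≤ t - s ∧ (t - s).toNat < (x :: l).length := ⟨by omega, by simp [h0]⟩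
      have h1 : ¬ (0 ≤ t - (s + 1) ∧ (t - (s + 1)).toNat < l.length) := by omega
      simp [hst]
    · have h1 : ((s, x).1 = t) = False := by simp [hst]
      simp only [h1, if_false, zero_add]
      by_cases hc : 0 ≤ t - s ∧ (t - s).toNat < (x :: l).length
      · have hlen : (t - s).toNat < l.length + 1 := by
          have := hc.2; simpa using this
        have hc' : 0 ≤ t - (s + 1) ∧ (t - (s + 1)).toNat < l.length := by omega
        rw [if_pos hc, if_pos hc']
        have he : (t - s).toNat = (t - (s + 1)).toNat + 1 := by omega
        simp [he]
      · have hc' : ¬ (0 ≤ t - (s + 1) ∧ (t - (s + 1)).toNat < l.length) := by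
          intro h0
          apply hc
          refine ⟨by omega, ?_⟩
          simp only [List.length_cons]
          omega
        rw [if_neg hc, if_neg hc']

-- number of enumerated, in-slice zero cells at exactly position q
def pvHit (maps : List (List Int)) (q : Int × Int) : Nat :=
  ((PySem.List.enumerate maps 0).map (fun ir =>
    ((PySem.List.enumerate (PySem.List.slice ir.2 none (some (maps.length : Int))) 0).map
      (fun jv => if jv.2 = 0 ∧ ir.1 = q.1 ∧ jv.1 = q.2 then 1 else 0)).sum)).sum

-- occurrences of p in the event list = hits of the four cells that scatter onto p
theorem events_count (maps : List (List Int)) (p : Int × Int) :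
    (pvEvents maps).count p
      = (pvHit maps (p.1 + 1, p.2) + pvHit maps (p.1 - 1, p.2))
        + (pvHit maps (p.1, p.2 + 1) + pvHit maps (p.1, p.2 - 1)) := by
  unfold pvEvents pvHit
  rw [count_flatMap]
  have hrow : ∀ ir : Int × List Int,
      ((PySem.List.enumerate (PySem.List.slice ir.2 none (some (maps.length : Int))) 0).flatMap
        (fun jv => if jv.2 = 0 then pvNbrs ir.1 jv.1 else [])).count p
      = (((PySem.List.enumerate (PySem.List.slice ir.2 none (some (maps.length : Int))) 0).map
            (fun jv => if jv.2 = 0 ∧ ir.1 = (p.1 + 1, p.2).1 ∧ jv.1 = (p.1 + 1, p.2).2 then 1 else 0)).sum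
          + ((PySem.List.enumerate (PySem.List.slice ir.2 none (some (maps.length : Int))) 0).map
            (fun jv => if jv.2 = 0 ∧ ir.1 = (p.1 - 1, p.2).1 ∧ jv.1 = (p.1 - 1, p.2).2 then 1 else 0)).sum)
        + (((PySem.List.enumerate (PySem.List.slice ir.2 none (some (maps.length : Int))) 0).map
            (fun jv => if jv.2 = 0 ∧ ir.1 = (p.1, p.2 + 1).1 ∧ jv.1 = (p.1, p.2 + 1).2 then 1 else 0)).sum
          + ((PySem.List.enumerate (PySem.List.slice ir.2 none (some (maps.length : Int))) 0).map
            (fun jv => if jv.2 = 0 ∧ ir.1 = (p.1, p.2 - 1).1 ∧ jv.1 = (p.1, p.2 - 1).2 then 1 else 0)).sum) := by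
    intro ir
    rw [count_flatMap, ← sum_map_add, ← sum_map_add, ← sum_map_add]
    refine congrArg List.sum (List.map_congr_left ?_)
    intro jv _
    by_cases hz : jv.2 = 0
    · rw [if_pos hz, count_nbrs]
      have e1 : (p = (ir.1 - 1, jv.1)) ↔ (ir.1 = p.1 + 1 ∧ jv.1 = p.2) := by
        rw [Prod.ext_iff]; constructor <;> (intro h; constructor <;> omega)
      have e2 : (p = (ir.1 + 1, jv.1)) ↔ (ir.1 = p.1 - 1 ∧ jv.1 = p.2) := by
        rw [Prod.ext_iff]; constructor <;> (intro h; constructor <;> omega)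
      have e3 : (p = (ir.1, jv.1 - 1)) ↔ (ir.1 = p.1 ∧ jv.1 = p.2 + 1) := by
        rw [Prod.ext_iff]; constructor <;> (intro h; constructor <;> omega)
      have e4 : (p = (ir.1, jv.1 + 1)) ↔ (ir.1 = p.1 ∧ jv.1 = p.2 - 1) := by
        rw [Prod.ext_iff]; constructor <;> (intro h; constructor <;> omega)
      simp only [hz, true_and, e1, e2, e3, e4]
    · simp [hz]
  rw [show (fun ir : Int × List Int =>
        ((PySem.List.enumerate (PySem.List.slice ir.2 none (some (maps.length : Int))) 0).flatMap
          (fun jv => if jv.2 = 0 then pvNbrs ir.1 jv.1 else [])).count p) = _ from funext hrow]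
  rw [← sum_map_add, ← sum_map_add, ← sum_map_add]

-- closed form of pvHit
theorem pvHit_closed (maps : List (List Int)) (q : Int × Int) :
    pvHit maps q
      = if 0 ≤ q.1 ∧ q.1.toNat < maps.length ∧ 0 ≤ q.2 ∧
            q.2.toNat < ((maps.getD q.1.toNat []).take maps.length).length ∧
            ((maps.getD q.1.toNat []).take maps.length).getD q.2.toNat 1 = 0
        then 1 else 0 := by
  unfold pvHit
  have hrow : ∀ ir : Int × List Int,
      ((PySem.List.enumerate (PySem.List.slice ir.2 none (some (maps.length : Int))) 0).map
        (fun jv => if jv.2 = 0 ∧ ir.1 = q.1 ∧ jv.1 = q.2 then 1 else 0)).sum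
      = if ir.1 = q.1 then
          ((PySem.List.enumerate (ir.2.take maps.length) 0).map
            (fun jv => if jv.1 = q.2 then (if jv.2 = 0 then 1 else 0) else 0)).sum
        else 0 := by
    intro ir
    rw [PySem.List.slice_to_natCast]
    by_cases hi : ir.1 = q.1
    · rw [if_pos hi]
      refine congrArg List.sum (List.map_congr_left ?_)
      intro jv _
      by_cases hj : jv.1 = q.2 <;> by_cases hz : jv.2 = 0 <;> simp [hi, hj, hz]
    · rw [if_neg hi]
      have : ∀ jv : Int × Int, (if jv.2 = 0 ∧ ir.1 = q.1 ∧ jv.1 = q.2 then (1:Nat) else 0) = 0 := by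
        intro jv; simp [hi]
      simp [this]
  rw [show (fun ir : Int × List Int =>
        ((PySem.List.enumerate (PySem.List.slice ir.2 none (some (maps.length : Int))) 0).map
          (fun jv => if jv.2 = 0 ∧ ir.1 = q.1 ∧ jv.1 = q.2 then 1 else 0)).sum) = _ from funext hrow]
  rw [sum_enum maps 0 q.1 (fun row => ((PySem.List.enumerate (row.take maps.length) 0).map
        (fun jv => if jv.1 = q.2 then (if jv.2 = 0 then 1 else 0) else 0)).sum) []]
  by_cases h1 : 0 ≤ q.1 - 0 ∧ (q.1 - 0).toNat < maps.length
  · rw [if_pos h1, sum_enum _ 0 q.2 (fun v => if v = 0 then 1 else 0) 1]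
    have e0 : (q.1 - 0).toNat = q.1.toNat := by omega
    rw [e0]
    by_cases h2 : 0 ≤ q.2 - 0 ∧ (q.2 - 0).toNat < ((maps.getD q.1.toNat []).take maps.length).length
    · rw [if_pos h2]
      have e2 : (q.2 - 0).toNat = q.2.toNat := by omega
      rw [e2]
      by_cases hz : ((maps.getD q.1.toNat []).take maps.length).getD q.2.toNat 1 = 0
      · rw [if_pos hz, if_pos ⟨by omega, by omega, by omega, by omega, hz⟩]
      · rw [if_neg hz, if_neg (fun hc => hz hc.2.2.2.2)]
    · rw [if_neg h2]
      split_ifs with hc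
      · exact absurd ⟨by omega, by omega⟩ h2
      · rfl
  · rw [if_neg h1]
    split_ifs with hc
    · exact absurd ⟨by omega, by omega⟩ h1
    · rfl

-- the gather-side indicator of A for the probed cell q (Pre_ supplies hq)
theorem hit_eq_gather (maps : List (List Int)) (q : Int × Int)
    (hq : (0 ≤ q.1 ∧ q.1 < (maps.length : Int) ∧ 0 ≤ q.2 ∧ q.2 < (maps.length : Int)) →
          q.2 < ((PySem.List.pyGetD maps q.1 []).length : Int)) :
    (pvHit maps q : Int)
      = if 0 ≤ q.1 ∧ q.1 < (maps.length : Int) ∧ 0 ≤ q.2 ∧ q.2 < (maps.length : Int) ∧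
            PySem.List.pyGetD (PySem.List.pyGetD maps q.1 []) q.2 1 = 0
        then 1 else 0 := by
  rw [pvHit_closed]
  simp only [Nat.cast_ite, Nat.cast_one, Nat.cast_zero]
  by_cases h1 : 0 ≤ q.1 ∧ q.1 < (maps.length : Int)
  · have hrow : PySem.List.pyGetD maps q.1 [] = maps.getD q.1.toNat [] := by
      rw [PySem.List.pyGetD_eq_getElem _ _ h1.1 h1.2, List.getD_eq_getElem _ _ (by omega)]
    by_cases h2 : 0 ≤ q.2 ∧ q.2 < (maps.length : Int)
    · have hlen : q.2 < ((maps.getD q.1.toNat []).length : Int) := by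
        have := hq ⟨h1.1, h1.2, h2.1, h2.2⟩
        rwa [hrow] at this
      have htake : q.2.toNat < ((maps.getD q.1.toNat []).take maps.length).length := by
        rw [List.length_take]; omega
      have hval : ((maps.getD q.1.toNat []).take maps.length).getD q.2.toNat 1
          = PySem.List.pyGetD (PySem.List.pyGetD maps q.1 []) q.2 1 := by
        rw [hrow, PySem.List.pyGetD_eq_getElem _ _ h2.1 hlen,
            List.getD_eq_getElem _ _ htake, List.getElem_take]
      by_cases hz : PySem.List.pyGetD (PySem.List.pyGetD maps q.1 []) q.2 1 = 0
      · rw [if_pos ⟨h1.1, by omega, h2.1, htake, by rw [hval]; exact hz⟩,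
            if_pos ⟨h1.1, h1.2, h2.1, h2.2, hz⟩]
      · rw [if_neg (fun hc => hz (by rw [← hval]; exact hc.2.2.2.2)),
            if_neg (fun hc => hz hc.2.2.2.2)]
    · have hle : ((maps.getD q.1.toNat []).take maps.length).length ≤ maps.length := by
        simp [List.length_take]
      rw [if_neg (fun hc => h2 ⟨hc.2.2.1, by omega⟩),
          if_neg (fun hc => h2 ⟨hc.2.2.1, hc.2.2.2.1⟩)]
  · rw [if_neg (fun hc => h1 ⟨hc.1, by omega⟩), if_neg (fun hc => h1 ⟨hc.1, hc.2.1⟩)]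

-- A's inner loop as four indicators (in the scatter grouping)
theorem countA_char (maps : List (List Int)) (node : Int × Int) :
    pvCountA maps node
      = ((if 0 ≤ node.1 + 1 ∧ node.1 + 1 < (maps.length : Int) ∧ 0 ≤ node.2 ∧ node.2 < (maps.length : Int) ∧
              PySem.List.pyGetD (PySem.List.pyGetD maps (node.1 + 1) []) node.2 1 = 0 then (1:Int) else 0)
          + (if 0 ≤ node.1 - 1 ∧ node.1 - 1 < (maps.length : Int) ∧ 0 ≤ node.2 ∧ node.2 < (maps.length : Int) ∧
              PySem.List.pyGetD (PySem.List.pyGetD maps (node.1 - 1) []) node.2 1 = 0 then (1:Int) else 0))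
        + ((if 0 ≤ node.1 ∧ node.1 < (maps.length : Int) ∧ 0 ≤ node.2 + 1 ∧ node.2 + 1 < (maps.length : Int) ∧
              PySem.List.pyGetD (PySem.List.pyGetD maps node.1 []) (node.2 + 1) 1 = 0 then (1:Int) else 0)
          + (if 0 ≤ node.1 ∧ node.1 < (maps.length : Int) ∧ 0 ≤ node.2 - 1 ∧ node.2 - 1 < (maps.length : Int) ∧
              PySem.List.pyGetD (PySem.List.pyGetD maps node.1 []) (node.2 - 1) 1 = 0 then (1:Int) else 0)) := by
  have h4 : PySem.List.pyRange 0 4 1 = [0, 1, 2, 3] := by decide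
  unfold pvCountA
  simp only [h4, List.foldl_cons, List.foldl_nil]
  have g0 : PySem.List.pyGetD ([-1, 1, 0, 0] : List Int) 0 0 = -1 := by decide
  have g1 : PySem.List.pyGetD ([-1, 1, 0, 0] : List Int) 1 0 = 1 := by decide
  have g2 : PySem.List.pyGetD ([-1, 1, 0, 0] : List Int) 2 0 = 0 := by decide
  have g3 : PySem.List.pyGetD ([-1, 1, 0, 0] : List Int) 3 0 = 0 := by decide
  have h0 : PySem.List.pyGetD ([0, 0, -1, 1] : List Int) 0 0 = 0 := by decide
  have h1 : PySem.List.pyGetD ([0, 0, -1, 1] : List Int) 1 0 = 0 := by decide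
  have h2 : PySem.List.pyGetD ([0, 0, -1, 1] : List Int) 2 0 = -1 := by decide
  have h3 : PySem.List.pyGetD ([0, 0, -1, 1] : List Int) 3 0 = 1 := by decide
  simp only [g0, g1, g2, g3, h0, h1, h2, h3]
  have e1 : node.1 + (-1 : Int) = node.1 - 1 := by ring
  have e2 : node.2 + (-1 : Int) = node.2 - 1 := by ring
  have e3 : node.1 + (0 : Int) = node.1 := by ring
  have e4 : node.2 + (0 : Int) = node.2 := by ring
  simp only [e1, e2, e3, e4]
  split_ifs <;> omega

-- scatter = gather, per node (hpre is Pre_'s clause for this node)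
theorem count_events_eq_countA (maps : List (List Int)) (node : Int × Int)
    (hpre : ∀ d ∈ ([(-1, 0), (1, 0), (0, -1), (0, 1)] : List (Int × Int)),
      (0 ≤ node.1 + d.1 ∧ node.1 + d.1 < (maps.length : Int) ∧
       0 ≤ node.2 + d.2 ∧ node.2 + d.2 < (maps.length : Int)) →
      node.2 + d.2 < ((PySem.List.pyGetD maps (node.1 + d.1) []).length : Int)) :
    (((pvEvents maps).count node : Nat) : Int) = pvCountA maps node := by
  have w1 : (0 ≤ node.1 + 1 ∧ node.1 + 1 < (maps.length : Int) ∧ 0 ≤ node.2 ∧ node.2 < (maps.length : Int)) →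
      node.2 < ((PySem.List.pyGetD maps (node.1 + 1) []).length : Int) := by
    intro h
    have hh := hpre (1, 0) (by norm_num)
    simp only [add_zero] at hh
    exact hh ⟨h.1, h.2.1, h.2.2.1, h.2.2.2⟩
  have w2 : (0 ≤ node.1 - 1 ∧ node.1 - 1 < (maps.length : Int) ∧ 0 ≤ node.2 ∧ node.2 < (maps.length : Int)) →
      node.2 < ((PySem.List.pyGetD maps (node.1 - 1) []).length : Int) := by
    intro h
    have hh := hpre (-1, 0) (by norm_num)
    simp only [add_zero, ← sub_eq_add_neg] at hh
    exact hh ⟨h.1, h.2.1, h.2.2.1, h.2.2.2⟩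
  have w3 : (0 ≤ node.1 ∧ node.1 < (maps.length : Int) ∧ 0 ≤ node.2 + 1 ∧ node.2 + 1 < (maps.length : Int)) →
      node.2 + 1 < ((PySem.List.pyGetD maps node.1 []).length : Int) := by
    intro h
    have hh := hpre (0, 1) (by norm_num)
    simp only [add_zero] at hh
    exact hh ⟨h.1, h.2.1, h.2.2.1, h.2.2.2⟩
  have w4 : (0 ≤ node.1 ∧ node.1 < (maps.length : Int) ∧ 0 ≤ node.2 - 1 ∧ node.2 - 1 < (maps.length : Int)) →
      node.2 - 1 < ((PySem.List.pyGetD maps node.1 []).length : Int) := by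
    intro h
    have hh := hpre (0, -1) (by norm_num)
    simp only [add_zero, ← sub_eq_add_neg] at hh
    exact hh ⟨h.1, h.2.1, h.2.2.1, h.2.2.2⟩
  rw [events_count]
  push_cast
  rw [hit_eq_gather maps (node.1 + 1, node.2) w1, hit_eq_gather maps (node.1 - 1, node.2) w2,
      hit_eq_gather maps (node.1, node.2 + 1) w3, hit_eq_gather maps (node.1, node.2 - 1) w4,
      countA_char]

-- two nonempty Int lists with the same members have the same max
theorem pv_max_eq (l₁ l₂ : List Int) (h : ∀ x, x ∈ l₁ ↔ x ∈ l₂)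
    (m₁ m₂ : Int) (h₁ : PySem.List.max? l₁ (fun k => k) = some m₁)
    (h₂ : PySem.List.max? l₂ (fun k => k) = some m₂) : m₁ = m₂ := by
  have hm₁ := PySem.List.max?_mem h₁
  have hm₂ := PySem.List.max?_mem h₂
  have := PySem.List.max?_isMax h₁ m₂ ((h m₂).mpr hm₂)
  have := PySem.List.max?_isMax h₂ m₁ ((h m₁).mp hm₁)
  omega

theorem final_spec : ∀ (maps : List (List Int)) (upper_result : List (Int × Int)),
    Pre_filter_second_cond maps upper_result →
    filter_second_cond maps upper_result = filter_second_cond_alt maps upper_result := by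
  intro maps upper hpre
  obtain ⟨hne, hrows⟩ := hpre
  unfold filter_second_cond filter_second_cond_alt
  rw [scan_eq_foldl_events]
  set d0 := pvCounts0 upper with hd0
  set counts := (pvEvents maps).foldl pvBump d0 with hcounts
  -- B's dict: keys, nodup, contains, lookups
  have hkeys : counts.keys = PySem.Set.ofList upper := by
    rw [hcounts, foldl_bump_keys, hd0, counts0_keys]
  have hnodup : counts.keys.Nodup := by rw [hkeys]; exact PySem.Set.nodup_ofList upper
  have hmemk : ∀ p, p ∈ counts.keys ↔ p ∈ upper := by
    intro p; rw [hkeys]; exact PySem.Set.mem_ofList _ _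
  have hlook : ∀ p ∈ upper, counts.getD p 0 = pvCountA maps p := by
    intro p hp
    have hcont : d0.contains p = true := by
      rw [PySem.Dict.contains_eq_decide_mem_keys, hd0, counts0_keys]
      simp [(PySem.Set.mem_ofList _ _).mpr hp]
    rw [hcounts, foldl_bump_getD _ _ _ hcont, hd0]
    have h0 : (pvCounts0 upper).getD p 0 = 0 := by
      unfold pvCounts0; exact counts0_getD upper _ p (by simp)
    rw [h0, zero_add]
    exact count_events_eq_countA maps p (hrows p hp)
  -- A's dict as a fold over (count, node) pairs
  have hA : pvDictA maps upper
      = (upper.map (fun node => (pvCountA maps node, (node.1, node.2)))).foldl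
          (fun d p => d.modify p.1 [] (· ++ [p.2])) PySem.Dict.empty := by
    unfold pvDictA; rw [List.foldl_map]
  have hAkeys : (pvDictA maps upper).keys = PySem.Set.ofList (upper.map (pvCountA maps)) := by
    unfold pvDictA
    rw [PySem.Dict.keys_foldl_modify_key upper (pvCountA maps) []
      (fun _ node v => v ++ [(node.1, node.2)]) PySem.Dict.empty]
    simp [PySem.Set.update_nil_left]
  -- the two max computations see the same set of counts
  have hmemv : ∀ x, x ∈ (pvDictA maps upper).keys ↔ x ∈ counts.values := by
    intro x
    rw [hAkeys]
    rw [PySem.Set.mem_ofList]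
    rw [PySem.Dict.values_eq_map_keys counts hnodup 0]
    constructor
    · intro hx
      rcases List.mem_map.mp hx with ⟨node, hn, he⟩
      exact List.mem_map.mpr ⟨node, (hmemk node).mpr hn, by rw [hlook node hn]; exact he⟩
    · intro hx
      rcases List.mem_map.mp hx with ⟨node, hn, he⟩
      have hn' := (hmemk node).mp hn
      exact List.mem_map.mpr ⟨node, hn', by rw [← hlook node hn']; exact he⟩
  have hAne : (pvDictA maps upper).keys ≠ [] := by
    intro h0
    rcases List.exists_mem_of_ne_nil upper hne with ⟨p, hp⟩
    have : pvCountA maps p ∈ (pvDictA maps upper).keys := by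
      rw [hAkeys, PySem.Set.mem_ofList]; exact List.mem_map_of_mem hp
    rw [h0] at this; exact List.not_mem_nil this
  have hBne : counts.values ≠ [] := by
    intro h0
    rcases List.exists_mem_of_ne_nil upper hne with ⟨p, hp⟩
    have : counts.getD p 0 ∈ counts.values := by
      rw [PySem.Dict.values_eq_map_keys counts hnodup 0]
      exact List.mem_map_of_mem ((hmemk p).mpr hp)
    rw [h0] at this; exact List.not_mem_nil this
  obtain ⟨m, hm⟩ : ∃ m, PySem.List.max? (pvDictA maps upper).keys (fun k => k) = some m := by
    cases hmx : PySem.List.max? (pvDictA maps upper).keys (fun k => k) with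
    | none => exact absurd ((PySem.List.max?_eq_none_iff _ _).mp hmx) hAne
    | some m => exact ⟨m, rfl⟩
  obtain ⟨b, hb⟩ : ∃ b, PySem.List.max? counts.values (fun k => k) = some b := by
    cases hmx : PySem.List.max? counts.values (fun k => k) with
    | none => exact absurd ((PySem.List.max?_eq_none_iff _ _).mp hmx) hBne
    | some b => exact ⟨b, rfl⟩
  have hmb : m = b := pv_max_eq _ _ hmemv m b hm hb
  rw [hm, hb, ← hmb]
  dsimp only
  -- A's group at m is the filter of upper by count m
  rw [hA, PySem.Dict.getD_foldl_modify_append, PySem.Dict.getD_empty, List.nil_append,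
      List.filter_map, List.map_map]
  -- the projection after the pairing is the identity
  rw [show ((fun x : Int × (Int × Int) => x.2) ∘ fun node : Int × Int => (pvCountA maps node, (node.1, node.2))) = id from rfl, List.map_id]
  -- B's filter agrees pointwise on members of upper
  apply List.filter_congr
  intro p hp
  show (pvCountA maps p == m) = (counts.getD p 0 == m)
  rw [hlook p hp]

-- ===== VERDICT (by name: the statements are the Claim_ definitions above) =====
theorem filter_second_cond_spec : Claim_equal_filter_second_cond := by
  intro maps upper_result _ hpre
  unfold Spec_filter_second_cond
  exact final_spec maps upper_result hpre
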